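-- pv_equiv track=rewrite | github.com/chrispukas/geo-biodiversity-dataset | gbio/src/gbif_query.py | bucket_redlist
-- ===== SOURCE A (Python) =====
-- def bucket_redlist(
--                     data: dict
--                     ):
--     # Bucket the data by IUCN Red List status
--     buckets = {
--         'EX': [],
--         'EW': [],
--         'CR': [],
--         'EN': [],
--         'VU': [],
--         'NT': [],
--         'LC': [],
--         'DD': [],
--         'NE': [],
--     }
--     for record in data.get('results', []):
--         status = record.get('iucnRedListCategory', 'NE')
--         if status in buckets:
--             buckets[status].append(record)
--         else:
--             buckets['NE'].append(record)
--     return buckets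
-- ===== SOURCE B (Python) =====
-- CATEGORIES = ('EX', 'EW', 'CR', 'EN', 'VU', 'NT', 'LC', 'DD', 'NE')
--
--
-- def bucket_redlist(data: dict):
--     # Bucket the data by IUCN Red List status: one filter pass per category.
--     results = data.get('results', [])
--
--     def norm(record):
--         status = record.get('iucnRedListCategory', 'NE')
--         return status if status in CATEGORIES else 'NE'
--
--     return {cat: [r for r in results if norm(r) == cat] for cat in CATEGORIES}
-- ===== Notes on version B (the rewrite author's own statement) =====
-- stated objective: simpler
-- what changed: Replaces A's single distributing loop that appends into a pre-seeded mutable bucket dict with a dict comprehension doing one filter pass per fixed category, with the status normalization factored into a helper.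
import Mathlib
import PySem

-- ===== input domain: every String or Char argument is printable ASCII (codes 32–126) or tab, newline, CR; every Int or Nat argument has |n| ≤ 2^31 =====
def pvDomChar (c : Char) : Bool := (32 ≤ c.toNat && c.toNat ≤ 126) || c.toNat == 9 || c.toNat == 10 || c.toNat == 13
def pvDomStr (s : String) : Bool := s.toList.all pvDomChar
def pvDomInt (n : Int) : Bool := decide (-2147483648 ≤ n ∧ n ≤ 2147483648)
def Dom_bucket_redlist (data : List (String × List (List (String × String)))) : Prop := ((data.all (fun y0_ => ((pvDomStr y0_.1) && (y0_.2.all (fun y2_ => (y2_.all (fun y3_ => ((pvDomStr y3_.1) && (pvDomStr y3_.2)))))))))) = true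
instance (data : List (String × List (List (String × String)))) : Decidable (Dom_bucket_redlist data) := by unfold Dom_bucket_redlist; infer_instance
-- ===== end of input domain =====

-- B replaces A's single distributing append-loop over a mutable bucket dict by one
-- filter pass per fixed category (simpler: shorter, no mutable state).

-- ===== PORT A =====
def bucket_redlist (data : List (String × List (List (String × String)))) : List (String × List (List (String × String))) :=
  let buckets : PySem.Dict String (List (List (String × String))) :=
    PySem.Dict.ofList
      [("EX", []), ("EW", []), ("CR", []), ("EN", []), ("VU", []),
       ("NT", []), ("LC", []), ("DD", []), ("NE", [])]
  let final := (List.lookup "results" data).getD [] |>.foldl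
    (fun b record =>
      let status := (List.lookup "iucnRedListCategory" record).getD "NE"
      if b.contains status then
        b.modify status [] (· ++ [record])
      else
        b.modify "NE" [] (· ++ [record]))
    buckets
  final.items

-- ===== PORT B =====
def pvCategories : List String := ["EX", "EW", "CR", "EN", "VU", "NT", "LC", "DD", "NE"]

def pvNorm (record : List (String × String)) : String :=
  let status := (List.lookup "iucnRedListCategory" record).getD "NE"
  if pvCategories.contains status then status else "NE"

def bucket_redlist_alt (data : List (String × List (List (String × String)))) : List (String × List (List (String × String))) :=
  let results := (List.lookup "results" data).getD []
  pvCategories.map (fun cat => (cat, results.filter (fun r => pvNorm r == cat)))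

-- ===== PRECONDITION & SPEC =====
def Spec_bucket_redlist (data : List (String × List (List (String × String)))) (out : List (String × List (List (String × String)))) : Prop := out = bucket_redlist_alt data
instance (data : List (String × List (List (String × String)))) (out : List (String × List (List (String × String)))) : Decidable (Spec_bucket_redlist data out) := by unfold Spec_bucket_redlist; infer_instance

-- ===== CLAIM (what is proved, stated in full; the proofs are below) =====
def Claim_equal_bucket_redlist : Prop := ∀ (data : List (String × List (List (String × String)))), Dom_bucket_redlist data → Spec_bucket_redlist data (bucket_redlist data)

-- ===== LEMMAS AND PROOFS =====

-- A's loop body, with the bucket keys known to be exactly pvCategories, is a modify at pvNorm.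
lemma pv_step_eq (b : PySem.Dict String (List (List (String × String))))
    (hk : b.keys = pvCategories) (record : List (String × String)) :
    (let status := (List.lookup "iucnRedListCategory" record).getD "NE"
     if b.contains status then b.modify status [] (· ++ [record])
     else b.modify "NE" [] (· ++ [record]))
    = b.modify (pvNorm record) [] (· ++ [record]) := by
  simp only [pvNorm, PySem.Dict.contains_eq_decide_mem_keys, hk]
  by_cases h : ((List.lookup "iucnRedListCategory" record).getD "NE") ∈ pvCategories <;>
    simp [h]

lemma pvNorm_mem (r : List (String × String)) : pvNorm r ∈ pvCategories := by
  unfold pvNorm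
  dsimp only
  split_ifs with h
  · exact List.contains_iff_mem.mp h
  · simp [pvCategories]

lemma pv_keys_modify_mem (b : PySem.Dict String (List (List (String × String))))
    (hk : b.keys = pvCategories) (k : String) (hkm : k ∈ pvCategories)
    (f : List (List (String × String)) → List (List (String × String))) :
    (b.modify k [] f).keys = pvCategories := by
  rw [PySem.Dict.keys_modify, PySem.Dict.keys_insert_of_contains]
  · exact hk
  · rw [PySem.Dict.contains_eq_decide_mem_keys, hk]; simpa using hkm

-- Loop invariant: folding A's step over l from any dict whose keys are exactly pvCategories
-- yields, as items, each category paired with its old bucket plus the filtered records.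
lemma pv_loop_items (l : List (List (String × String)))
    (b : PySem.Dict String (List (List (String × String)))) (hk : b.keys = pvCategories) :
    (l.foldl (fun b record =>
        let status := (List.lookup "iucnRedListCategory" record).getD "NE"
        if b.contains status then b.modify status [] (· ++ [record])
        else b.modify "NE" [] (· ++ [record])) b).items
      = pvCategories.map (fun cat => (cat, b.getD cat [] ++ l.filter (fun r => pvNorm r == cat))) := by
  induction l generalizing b with
  | nil =>
      simp only [List.foldl_nil, List.filter_nil, List.append_nil]
      rw [PySem.Dict.items_eq_map_keys b (by rw [hk]; decide) [], hk]
  | cons r t ih =>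
      rw [List.foldl_cons, pv_step_eq b hk r,
        ih _ (pv_keys_modify_mem b hk (pvNorm r) (pvNorm_mem r) _)]
      refine List.map_congr_left (fun c _ => ?_)
      rw [PySem.Dict.getD_modify]
      by_cases h : c = pvNorm r
      · subst h
        simp
      · have hne : ¬ ((pvNorm r == c) = true) := by rw [beq_iff_eq]; exact fun e => h e.symm
        rw [if_neg h, List.filter_cons, if_neg hne]

lemma pv_init_getD (c : String) (hc : c ∈ pvCategories) :
    (PySem.Dict.ofList
      [("EX", ([] : List (List (String × String)))), ("EW", []), ("CR", []), ("EN", []), ("VU", []),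
       ("NT", []), ("LC", []), ("DD", []), ("NE", [])]).getD c [] = [] := by
  fin_cases hc <;> decide

-- ===== VERDICT (by name: the statement is the Claim_ definition above) =====
theorem bucket_redlist_spec : Claim_equal_bucket_redlist := by
  intro data _
  show bucket_redlist data = bucket_redlist_alt data
  unfold bucket_redlist bucket_redlist_alt
  rw [pv_loop_items _ _ (by decide)]
  exact List.map_congr_left (fun c hc => by rw [pv_init_getD c hc]; simp)
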